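-- pv_equiv track=rewrite | github.com/HarowitzBlack/problems | nearly_equal.py | check_for_replaced_char
-- ===== SOURCE A (Python) =====
-- def check_for_replaced_char(string1, string2):
--     """ function to check replaced char
--     """
--     string1,string2 = list(string1),list(string2)
--     score = 0
--     if len(string2) > len(string1):
--         return False
--     # add to score only if position of a char matches the same in string2
--     for xpos,x in enumerate(string1):
--         if x in string2 and xpos == string2.index(x):
--             score += 1
--     # generate a new stripped version of string1 to compare with score
--     strip_string1 = ''
--     for x in string1:
--         if x not in strip_string1:
--             strip_string1 += x
--     # if score and new stripped string match the chars are replaced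
--     if score == len(strip_string1) or score == len(strip_string1) - 1:
--         return True
--     return False
-- ===== SOURCE B (Python) =====
-- def check_for_replaced_char(string1, string2):
--     """ function to check replaced char
--     """
--     if len(string2) > len(string1):
--         return False
--     # first-occurrence index of string2: char -> first position it appears at
--     first = {}
--     for j, c in enumerate(string2):
--         if c not in first:
--             first[c] = j
--     # score counts string2's distinct chars that sit at their first position in string1
--     score = sum(1 for c, j in first.items() if string1[j] == c)
--     distinct = len(set(string1))
--     return score == distinct or score == distinct - 1
-- ===== Notes on version B (the rewrite author's own statement) =====
-- stated objective: faster
-- what changed: Replaces A's per-position loop over string1 (with a string2.index scan and a quadratic in-string dedup inside) by a single pass building a first-occurrence dict of string2 plus one pass over that dict's items, and len(set(string1)) for the dedup count.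
import Mathlib
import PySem

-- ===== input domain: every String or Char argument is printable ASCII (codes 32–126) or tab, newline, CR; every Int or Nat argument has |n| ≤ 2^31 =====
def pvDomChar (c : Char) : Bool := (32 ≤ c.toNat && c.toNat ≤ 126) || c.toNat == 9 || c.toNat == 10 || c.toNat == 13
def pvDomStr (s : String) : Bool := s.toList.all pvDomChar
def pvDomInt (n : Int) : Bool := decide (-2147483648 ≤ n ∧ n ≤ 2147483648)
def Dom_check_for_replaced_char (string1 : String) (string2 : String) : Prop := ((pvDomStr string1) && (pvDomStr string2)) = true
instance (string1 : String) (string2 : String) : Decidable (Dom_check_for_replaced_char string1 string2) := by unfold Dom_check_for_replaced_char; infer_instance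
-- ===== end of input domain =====

-- B replaces A's per-position scan of string1 (with a repeated string2.index scan inside)
-- by one pass building a first-occurrence dict of string2 and one pass over that dict's items.

-- ===== PORT A =====
def check_for_replaced_char (string1 : String) (string2 : String) : Bool :=
  let l1 := string1.toList
  let l2 := string2.toList
  if l2.length > l1.length then false
  else
    -- for xpos,x in enumerate(string1): if x in string2 and xpos == string2.index(x): score += 1
    let score : Int := (PySem.List.enumerate l1 0).foldl
      (fun s p => if p.2 ∈ l2 ∧ (PySem.List.index? l2 p.2).map (fun k => (k : Int)) = some p.1
                  then s + 1 else s) 0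
    -- strip_string1: first occurrences of string1, in order
    let strip : List Char := l1.foldl (fun acc x => if x ∉ acc then acc ++ [x] else acc) []
    if score = (strip.length : Int) ∨ score = (strip.length : Int) - 1 then true else false

-- ===== PORT B =====
def check_for_replaced_char_alt (string1 : String) (string2 : String) : Bool :=
  let l1 := string1.toList
  let l2 := string2.toList
  if l2.length > l1.length then false
  else
    -- first = {}; for j, c in enumerate(string2): if c not in first: first[c] = j
    let first : PySem.Dict Char Int := (PySem.List.enumerate l2 0).foldl
      (fun d p => if d.contains p.2 then d else d.insert p.2 p.1) PySem.Dict.empty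
    -- score = sum(1 for c, j in first.items() if string1[j] == c)
    let score : Int := first.items.foldl
      (fun s p => if PySem.List.pyGet? l1 p.2 = some p.1 then s + 1 else s) 0
    -- distinct = len(set(string1))
    let distinct : Int := ((PySem.Set.ofList l1).length : Int)
    decide (score = distinct ∨ score = distinct - 1)

-- ===== PRECONDITION & SPEC =====
def Spec_check_for_replaced_char (string1 : String) (string2 : String) (out : Bool) : Prop := out = check_for_replaced_char_alt string1 string2
instance (string1 : String) (string2 : String) (out : Bool) : Decidable (Spec_check_for_replaced_char string1 string2 out) := by unfold Spec_check_for_replaced_char; infer_instance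

-- ===== CLAIM (what is proved, stated in full; the proofs are below) =====
def Claim_equal_check_for_replaced_char : Prop := ∀ (string1 : String) (string2 : String), Dom_check_for_replaced_char string1 string2 → Spec_check_for_replaced_char string1 string2 (check_for_replaced_char string1 string2)

-- ===== LEMMAS AND PROOFS =====
theorem strip_eq_ofList (l1 : List Char) :
    l1.foldl (fun acc x => if x ∉ acc then acc ++ [x] else acc) [] = PySem.Set.ofList l1 := by
  rw [PySem.Set.ofList_eq_foldl]
  congr 1
  funext acc x
  simp [PySem.Set.add, PySem.Set.contains]

theorem dictFold_get? (l2 : List Char) : ∀ (s : Int) (d : PySem.Dict Char Int) (c : Char),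
    ((PySem.List.enumerate l2 s).foldl
      (fun d p => if d.contains p.2 then d else d.insert p.2 p.1) d).get? c
    = if d.contains c then d.get? c
      else (PySem.List.index? l2 c).map (fun k => s + (k : Int)) := by
  induction l2 with
  | nil =>
    intro s d c
    simp [PySem.List.enumerate_nil]
    intro h
    simp [PySem.Dict.contains_eq_isSome_get?] at h
    simp [h]
  | cons x t ih =>
    intro s d c
    rw [PySem.List.enumerate_cons]
    simp only [List.foldl_cons]
    by_cases hdx : d.contains x
    · rw [if_pos hdx, ih]
      by_cases hdc : d.contains c
      · simp [hdc]
      · have hcx : c ≠ x := fun h => hdc (h ▸ hdx)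
        rw [if_neg hdc, if_neg hdc, PySem.List.index?_cons_of_ne t (Ne.symm hcx)]
        cases PySem.List.index? t c <;> simp <;> ring
    · rw [if_neg hdx, ih]
      by_cases hcx : c = x
      · subst hcx
        rw [if_pos (PySem.Dict.contains_insert_self d c s), if_neg hdx,
            PySem.Dict.get?_insert_self, PySem.List.index?_cons_self]
        simp
      · rw [PySem.Dict.contains_insert, PySem.Dict.get?_insert_of_ne _ _ hcx,
            PySem.List.index?_cons_of_ne t (Ne.symm hcx)]
        have hbe : (c == x) = false := by simp [hcx]
        rw [hbe]
        simp only [Bool.false_or]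
        by_cases hdc : d.contains c
        · simp [hdc]
        · rw [if_neg hdc, if_neg hdc]
          cases PySem.List.index? t c <;> simp <;> ring

theorem dictFold_keys (l2 : List Char) : ∀ (s : Int) (d : PySem.Dict Char Int),
    ((PySem.List.enumerate l2 s).foldl
      (fun d p => if d.contains p.2 then d else d.insert p.2 p.1) d).keys
    = PySem.Set.update d.keys l2 := by
  induction l2 with
  | nil => intro s d; simp [PySem.List.enumerate_nil, PySem.Set.update_nil]
  | cons x t ih =>
    intro s d
    rw [PySem.List.enumerate_cons]
    simp only [List.foldl_cons]
    rw [PySem.Set.update_cons, ih (s+1)]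
    congr 1
    by_cases hdx : d.contains x
    · rw [if_pos hdx]
      have hx : x ∈ d.keys := (PySem.Dict.contains_iff_mem_keys d x).mp hdx
      simp [PySem.Set.add, PySem.Set.contains, hx]
    · rw [if_neg hdx, PySem.Dict.keys_insert_of_not_contains d s (by simpa using hdx)]
      have hx : x ∉ d.keys := fun h => hdx ((PySem.Dict.contains_iff_mem_keys d x).mpr h)
      simp [PySem.Set.add, PySem.Set.contains, hx]

theorem dictFold_items (l2 : List Char) :
    ((PySem.List.enumerate l2 0).foldl
      (fun d p => if d.contains p.2 then d else d.insert p.2 p.1) PySem.Dict.empty).items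
    = (PySem.Set.ofList l2).map (fun c => (c, (((PySem.List.index? l2 c).getD 0 : Nat) : Int))) := by
  have hkeys := dictFold_keys l2 0 PySem.Dict.empty
  rw [PySem.Dict.keys_empty, PySem.Set.update_nil_left] at hkeys
  rw [PySem.Dict.items_eq_map_keys _ (hkeys ▸ PySem.Set.nodup_ofList l2) 0, hkeys]
  apply List.map_congr_left
  intro c hc
  have hcm : c ∈ l2 := (PySem.Set.mem_ofList l2 c).mp hc
  have hidx : (PySem.List.index? l2 c).isSome :=
    (PySem.List.index?_isSome_iff l2 c).mpr hcm
  obtain ⟨k, hk⟩ := Option.isSome_iff_exists.mp hidx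
  rw [PySem.Dict.getD_eq_get?_getD, dictFold_get?, hk]
  simp [PySem.Dict.contains_eq_isSome_get?]

theorem count_eq (l1 l2 : List Char) :
    (PySem.List.enumerate l1 0).countP
      (fun p => decide (p.2 ∈ l2 ∧ (PySem.List.index? l2 p.2).map (fun k => (k : Int)) = some p.1))
    = (PySem.Set.ofList l2).countP
      (fun c => decide (PySem.List.pyGet? l1 (((PySem.List.index? l2 c).getD 0 : Nat) : Int) = some c)) := by
  set Q : Int × Char → Bool := fun p => decide (p.2 ∈ l2 ∧ (PySem.List.index? l2 p.2).map (fun k => (k : Int)) = some p.1) with hQ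
  set R : Char → Bool := fun c => decide (PySem.List.pyGet? l1 (((PySem.List.index? l2 c).getD 0 : Nat) : Int) = some c) with hR
  have hnd1 : (PySem.List.enumerate l1 0).Nodup := by
    have := PySem.List.pairwise_lt_enumerate l1 0
    exact this.imp (fun h => by intro he; rw [he] at h; exact lt_irrefl _ h)
  have hnd2 : (PySem.Set.ofList l2).Nodup := PySem.Set.nodup_ofList l2
  rw [List.countP_eq_length_filter, List.countP_eq_length_filter,
      ← List.toFinset_card_of_nodup (hnd1.filter Q),
      ← List.toFinset_card_of_nodup (hnd2.filter R),
      List.toFinset_filter, List.toFinset_filter]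
  apply Finset.card_bij' (fun p _ => p.2)
      (fun c _ => ((((PySem.List.index? l2 c).getD 0 : Nat) : Int), c))
  · -- forward membership
    intro p hp
    rw [Finset.mem_filter, List.mem_toFinset] at hp
    obtain ⟨hmem, hq⟩ := hp
    rw [hQ] at hq; simp only [decide_eq_true_eq] at hq
    obtain ⟨hin, hidx⟩ := hq
    obtain ⟨k, hk, hpk⟩ := (PySem.List.mem_enumerate_iff l1 0 p).mp hmem
    obtain ⟨k', hk', hck'⟩ : ∃ k', PySem.List.index? l2 p.2 = some k' ∧ (k' : Int) = p.1 := by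
      cases h : PySem.List.index? l2 p.2 with
      | none => rw [h] at hidx; simp at hidx
      | some k' => rw [h] at hidx; simp at hidx; exact ⟨k', rfl, hidx⟩
    have hp1 : p.1 = (k : Int) := by rw [hpk]; simp
    have hkk : k' = k := by exact_mod_cast hck'.trans hp1
    have hp2 : p.2 = l1[k] := by rw [hpk]
    rw [Finset.mem_filter, List.mem_toFinset]
    constructor
    · exact (PySem.Set.mem_ofList l2 p.2).mpr hin
    · rw [hR]; simp only [decide_eq_true_eq]
      rw [hk', hkk]
      simp only [Option.getD_some]
      rw [PySem.List.pyGet?_natCast, hp2]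
      exact List.getElem?_eq_getElem hk
  · -- backward membership
    intro c hc
    rw [Finset.mem_filter, List.mem_toFinset] at hc
    obtain ⟨hcm, hr⟩ := hc
    have hcl2 : c ∈ l2 := (PySem.Set.mem_ofList l2 c).mp hcm
    obtain ⟨k, hk⟩ := Option.isSome_iff_exists.mp ((PySem.List.index?_isSome_iff l2 c).mpr hcl2)
    rw [hR] at hr; simp only [decide_eq_true_eq] at hr
    rw [hk] at hr; simp only [Option.getD_some] at hr
    rw [PySem.List.pyGet?_natCast] at hr
    obtain ⟨hkl, hget⟩ := List.getElem?_eq_some_iff.mp hr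
    rw [Finset.mem_filter, List.mem_toFinset]
    constructor
    · rw [PySem.List.mem_enumerate_iff]
      refine ⟨k, hkl, ?_⟩
      rw [hk]; simp only [Option.getD_some]
      rw [hget]; simp
    · rw [hQ]; simp only [decide_eq_true_eq]
      rw [hk]; simp only [Option.getD_some]
      exact ⟨hcl2, by simp⟩
  · -- left inverse
    intro p hp
    rw [Finset.mem_filter, List.mem_toFinset] at hp
    obtain ⟨hmem, hq⟩ := hp
    rw [hQ] at hq; simp only [decide_eq_true_eq] at hq
    obtain ⟨hin, hidx⟩ := hq
    obtain ⟨k', hk', hck'⟩ : ∃ k', PySem.List.index? l2 p.2 = some k' ∧ (k' : Int) = p.1 := by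
      cases h : PySem.List.index? l2 p.2 with
      | none => rw [h] at hidx; simp at hidx
      | some k' => rw [h] at hidx; simp at hidx; exact ⟨k', rfl, hidx⟩
    rw [hk']
    simp only [Option.getD_some]
    exact Prod.ext hck' rfl
  · -- right inverse
    intro c _
    rfl

-- ===== VERDICT (by name: the statement is the Claim_ definition above) =====
theorem check_for_replaced_char_spec : Claim_equal_check_for_replaced_char := by
  intro string1 string2 _
  unfold Spec_check_for_replaced_char check_for_replaced_char check_for_replaced_char_alt
  set l1 := string1.toList
  set l2 := string2.toList
  by_cases hlen : l2.length > l1.length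
  · rw [if_pos hlen, if_pos hlen]
  · rw [if_neg hlen, if_neg hlen]
    simp only [PySem.List.foldl_ite_add_one
          (fun p : Int × Char => p.2 ∈ l2 ∧ (PySem.List.index? l2 p.2).map (fun k => (k : Int)) = some p.1),
        PySem.List.foldl_ite_add_one
          (fun p : Char × Int => PySem.List.pyGet? l1 p.2 = some p.1),
        dictFold_items, strip_eq_ofList, List.countP_map]
    rw [count_eq l1 l2]
    simp [Function.comp_def]
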